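-- pv_equiv track=rewrite | github.com/SSCE-UB/bcpc-league-problems | 2025-12-18_week03/A/solutions/solution.py | fractured_ledger
-- ===== SOURCE A (Python) =====
-- def fractured_ledger(N):
--     # محاسبه phi برای همه اعداد تا N با sieve
--     phi = list(range(N + 1))
--     for i in range(2, N + 1):
--         if phi[i] == i:  # i عدد اول است
--             for j in range(i, N + 1, i):
--                 phi[j] -= phi[j] // i
--
--     # مجموع phi ها
--     total_phi = sum(phi[1:])
--
--     # مجموع phi برای اعداد فرد
--     odd_phi = sum(phi[i] for i in range(1, N + 1, 2))
--
--     # فرمول نهایی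
--     return 2 * total_phi - 1 + odd_phi
-- ===== SOURCE B (Python) =====
-- def _phi(n):
--     # Euler phi of a single n by trial division (factor n on the fly).
--     r = n
--     m = n
--     p = 2
--     while p * p <= m:
--         if m % p == 0:
--             r -= r // p
--             while m % p == 0:
--                 m //= p
--         p += 1
--     if m > 1:
--         r -= r // m
--     return r
--
--
-- def fractured_ledger(N):
--     total = 0
--     odd = 0
--     for n in range(1, N + 1):
--         f = _phi(n)
--         total += f
--         if n % 2 == 1:
--             odd += f
--     return 2 * total - 1 + odd
-- ===== Notes on version B (the rewrite author's own statement) =====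
-- stated objective: alternative
-- what changed: Replaces the global in-place totient sieve over an O(N) array by an independent per-number trial-division factorisation (each phi(n) computed on its own in O(1) extra space), with both sums accumulated in a single pass.
import Mathlib
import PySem

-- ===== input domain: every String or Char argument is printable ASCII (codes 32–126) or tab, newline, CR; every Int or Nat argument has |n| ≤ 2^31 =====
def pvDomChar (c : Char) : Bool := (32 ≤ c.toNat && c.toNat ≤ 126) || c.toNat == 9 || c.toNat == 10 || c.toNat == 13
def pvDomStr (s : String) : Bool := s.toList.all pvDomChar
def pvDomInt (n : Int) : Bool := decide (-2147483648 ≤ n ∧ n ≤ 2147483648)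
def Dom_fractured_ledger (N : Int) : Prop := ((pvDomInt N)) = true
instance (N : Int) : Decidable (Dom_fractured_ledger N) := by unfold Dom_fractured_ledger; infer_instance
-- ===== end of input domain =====

-- B replaces A's global in-place totient sieve by an independent per-number
-- trial-division factorisation (same values, different algorithm; no O(N) array).


-- ===== PORT A =====
-- literal port of the Python sieve: phi = list(range(N+1)); prime detection by
-- phi[i] == i; inner loop updates phi[j] -= phi[j] // i over multiples; then sums.
def fractured_ledger (N : Int) : Int :=
  let phi0 := PySem.List.pyRange 0 (N + 1) 1
  let phi := (PySem.List.pyRange 2 (N + 1) 1).foldl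
    (fun φ i =>
      if PySem.List.pyGetD φ i 0 = i then
        (PySem.List.pyRange i (N + 1) i).foldl
          (fun ψ j =>
            PySem.List.pySetD ψ j
              (PySem.List.pyGetD ψ j 0 -
                PySem.Int.floordiv (PySem.List.pyGetD ψ j 0) i)) φ
      else φ) phi0
  let total_phi := (PySem.List.slice phi (some 1) none).foldl (· + ·) 0
  let odd_phi := (PySem.List.pyRange 1 (N + 1) 2).foldl
    (fun acc i => acc + PySem.List.pyGetD phi i 0) 0
  2 * total_phi - 1 + odd_phi

-- ===== PORT B =====
-- helper: the inner `while m % p == 0: m //= p` of Source B's _phi.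
-- The guards 1 < p and 0 < m only make the recursion total: Source B reaches this
-- loop solely with m ≥ 1 and p ≥ 2 (where Python's guard is just m % p == 0).
-- termination facts for the two helpers (cited by name in decreasing_by)
theorem pyStrip_dec (m p : Int) (hp : 1 < p) (hm : 0 < m) :
    (PySem.Int.floordiv m p).toNat < m.toNat := by
  rw [PySem.Int.floordiv_eq_ediv_of_pos (by omega)]
  have h1 := Int.ediv_mul_le m (show p ≠ 0 by omega)
  have h2 : 0 ≤ m / p := Int.ediv_nonneg (by omega) (by omega)
  have h3 : m / p < m := by nlinarith
  omega

def pyStrip (m p : Int) : Int :=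
  if h : 1 < p ∧ 0 < m ∧ PySem.Int.mod m p = 0 then
    pyStrip (PySem.Int.floordiv m p) p
  else m
termination_by m.toNat
decreasing_by
  exact pyStrip_dec m p h.1 h.2.1

theorem pyStrip_le (m p : Int) : pyStrip m p ≤ m := by
  fun_induction pyStrip m p with
  | case1 a h ih =>
    obtain ⟨hp, hm, hmod⟩ := h
    rw [PySem.Int.floordiv_eq_ediv_of_pos (by omega)] at ih
    have h1 := Int.ediv_mul_le a (show p ≠ 0 by omega)
    have h2 : 0 ≤ a / p := Int.ediv_nonneg (by omega) (by omega)
    rw [PySem.Int.floordiv_eq_ediv_of_pos (by omega)]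
    nlinarith
  | case2 => omega

theorem trialLoop_dec2 (p m : Int) (h : p * p ≤ m) :
    (m + 1 - (p + 1)).toNat < (m + 1 - p).toNat := by
  have hm : 0 ≤ m := le_trans (mul_self_nonneg p) h
  have hpm : p ≤ m := by
    rcases le_or_gt p 0 with hp | hp
    · omega
    · nlinarith
  omega

theorem trialLoop_dec1 (p m : Int) (h : p * p ≤ m) :
    (pyStrip m p + 1 - (p + 1)).toNat < (m + 1 - p).toNat := by
  have h1 := pyStrip_le m p
  have h2 := trialLoop_dec2 p m h
  omega

-- helper: the `while p * p <= m` loop of Source B's _phi; state (p, m, r).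
def trialLoop (p m r : Int) : Int × Int :=
  if h : p * p ≤ m then
    if PySem.Int.mod m p = 0 then
      trialLoop (p + 1) (pyStrip m p) (r - PySem.Int.floordiv r p)
    else trialLoop (p + 1) m r
  else (r, m)
termination_by (m + 1 - p).toNat
decreasing_by
  · exact trialLoop_dec1 p m h
  · exact trialLoop_dec2 p m h

-- port of Source B's _phi
def phiPort (n : Int) : Int :=
  let rm := trialLoop 2 n n
  if 1 < rm.2 then rm.1 - PySem.Int.floordiv rm.1 rm.2 else rm.1

-- port of Source B's fractured_ledger: one pass, both sums accumulated together
def fractured_ledger_alt (N : Int) : Int :=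
  let s := (PySem.List.pyRange 1 (N + 1) 1).foldl
    (fun (acc : Int × Int) n =>
      let f := phiPort n
      (acc.1 + f, if PySem.Int.mod n 2 = 1 then acc.2 + f else acc.2))
    (0, 0)
  2 * s.1 - 1 + s.2

-- ===== PRECONDITION & SPEC =====
def Spec_fractured_ledger (N : Int) (out : Int) : Prop := out = fractured_ledger_alt N
instance (N : Int) (out : Int) : Decidable (Spec_fractured_ledger N out) := by unfold Spec_fractured_ledger; infer_instance

-- ===== CLAIM (what is proved, stated in full; the proofs are below) =====
def Claim_equal_fractured_ledger : Prop := ∀ (N : Int), Dom_fractured_ledger N → Spec_fractured_ledger N (fractured_ledger N)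

-- ===== LEMMAS AND PROOFS =====

-- Both programs compute, for each n, the fold of r ↦ r - r / p over the
-- increasing list of primes p dividing n, started at n.  `pl p n` is that list
-- cut below p; `phiN n` is the common per-number value.

def stepN (r p : Nat) : Nat := r - r / p

def pl (p n : Nat) : List Nat :=
  (List.range p).filter (fun q => decide (Nat.Prime q ∧ q ∣ n))

def phiN (n : Nat) : Nat := (pl (n + 1) n).foldl stepN n

-- reference sums
def SAll (M : Nat) : Int := ((List.range' 1 M).map (fun j => (phiN j : Int))).foldl (· + ·) 0
def SOdd (M : Nat) : Int := ((List.range ((M+1)/2)).map (fun k => (phiN (1+2*k) : Int))).foldl (· + ·) 0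

-- ---- generic fold facts ----
theorem stepN_le (r p : Nat) : stepN r p ≤ r := Nat.sub_le _ _

theorem foldl_stepN_le (l : List Nat) : ∀ r : Nat, l.foldl stepN r ≤ r := by
  induction l with
  | nil => intro r; simp
  | cons a t ih => intro r; exact le_trans (ih (stepN r a)) (stepN_le r a)

theorem foldl_stepN_zero (l : List Nat) : l.foldl stepN 0 = 0 := by
  induction l with
  | nil => rfl
  | cons a t ih => simpa [stepN] using ih

-- ---- pl facts ----
theorem mem_pl {q p n : Nat} : q ∈ pl p n ↔ q < p ∧ q.Prime ∧ q ∣ n := by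
  simp [pl, List.mem_filter, List.mem_range]

theorem pl_succ (p n : Nat) :
    pl (p+1) n = pl p n ++ (if Nat.Prime p ∧ p ∣ n then [p] else []) := by
  unfold pl
  rw [List.range_succ, List.filter_append]
  congr 1
  by_cases h : Nat.Prime p ∧ p ∣ n <;> simp [h]

theorem pl_ext (p p' n : Nat) (h : p ≤ p')
    (hno : ∀ q, p ≤ q → q < p' → ¬(q.Prime ∧ q ∣ n)) : pl p' n = pl p n := by
  unfold pl
  have hsplit : p' = p + (p' - p) := by omega
  rw [hsplit, List.range_add, List.filter_append]
  have hz : ((List.range (p'-p)).map (p + ·)).filter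
      (fun q => decide (Nat.Prime q ∧ q ∣ n)) = [] := by
    rw [List.filter_eq_nil_iff]
    intro a ha
    simp only [List.mem_map, List.mem_range] at ha
    obtain ⟨k, hk, rfl⟩ := ha
    simpa using hno (p+k) (by omega) (by omega)
  rw [hz, List.append_nil]

theorem pl_stable (p p' n : Nat)
    (h1 : ∀ q, q.Prime → q ∣ n → q < p) (h2 : ∀ q, q.Prime → q ∣ n → q < p') :
    pl p n = pl p' n := by
  have e1 : pl (max p p') n = pl p n := by
    refine pl_ext p _ n (le_max_left _ _) ?_
    rintro q hq hq2 ⟨hpr, hdvd⟩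
    exact absurd (h1 q hpr hdvd) (by omega)
  have e2 : pl (max p p') n = pl p' n := by
    refine pl_ext p' _ n (le_max_right _ _) ?_
    rintro q hq hq2 ⟨hpr, hdvd⟩
    exact absurd (h2 q hpr hdvd) (by omega)
  rw [← e1, e2]

theorem pl_two (n : Nat) : pl 2 n = [] := by
  unfold pl
  simp [List.range_succ, Nat.not_prime_zero, Nat.not_prime_one]

theorem pl_eq_phi_list (j M : Nat) (h1 : 1 ≤ j) (hjM : j ≤ M) :
    pl (M+1) j = pl (j+1) j := by
  refine pl_ext (j+1) (M+1) j (by omega) ?_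
  rintro q hq hq2 ⟨hpr, hdvd⟩
  exact absurd (Nat.le_of_dvd h1 hdvd) (by omega)

-- ---- prime detection ----
theorem fold_pl_self_lt (n : Nat) (h2 : 2 ≤ n) (hnp : ¬ n.Prime) :
    (pl n n).foldl stepN n < n := by
  have hqp : n.minFac.Prime := Nat.minFac_prime (by omega)
  have hqd : n.minFac ∣ n := Nat.minFac_dvd n
  have hqlt : n.minFac < n := by
    have hle : n.minFac ≤ n := Nat.le_of_dvd (by omega) hqd
    rcases lt_or_eq_of_le hle with h | h
    · exact h
    · exact absurd (Nat.prime_def_minFac.mpr ⟨h2, h⟩) hnp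
  have hmem : n.minFac ∈ pl n n := mem_pl.mpr ⟨hqlt, hqp, hqd⟩
  cases hpl : pl n n with
  | nil => rw [hpl] at hmem; cases hmem
  | cons a t =>
    have ha : a ∈ pl n n := hpl ▸ List.mem_cons_self
    obtain ⟨halt, hap, had⟩ := mem_pl.mp ha
    simp only [List.foldl_cons]
    have h1 : stepN n a < n := by
      unfold stepN
      have hd1 : 1 ≤ n / a := (Nat.one_le_div_iff hap.pos).mpr (Nat.le_of_dvd (by omega) had)
      omega
    exact lt_of_le_of_lt (foldl_stepN_le t _) h1

theorem pl_self_prime (n : Nat) (hp : n.Prime) : pl n n = [] := by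
  unfold pl
  rw [List.filter_eq_nil_iff]
  intro q hq
  simp only [List.mem_range] at hq
  simp only [Bool.not_eq_true, decide_eq_false_iff_not]
  rintro ⟨hpr, hdvd⟩
  rcases hp.eq_one_or_self_of_dvd q hdvd with h | h
  · have := hpr.two_le; omega
  · omega

theorem fold_pl_detect (n : Nat) (h2 : 2 ≤ n) :
    ((pl n n).foldl stepN n = n ↔ n.Prime) := by
  constructor
  · intro h
    by_contra hnp
    exact absurd h (Nat.ne_of_lt (fold_pl_self_lt n h2 hnp))
  · intro hp
    rw [pl_self_prime n hp]
    rfl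

-- ---- B side: Nat models of the port helpers ----
def stripN (m p : Nat) : Nat :=
  if h : 2 ≤ p ∧ 0 < m ∧ p ∣ m then stripN (m / p) p else m
termination_by m
decreasing_by
  exact Nat.div_lt_self h.2.1 (by omega)

theorem stripN_le (m p : Nat) : stripN m p ≤ m := by
  fun_induction stripN m p with
  | case1 a h ih => exact le_trans ih (Nat.div_le_self _ _)
  | case2 => omega

def loopN (p m r : Nat) : Nat × Nat :=
  if p * p ≤ m then
    (if p ∣ m then loopN (p+1) (stripN m p) (r - r/p) else loopN (p+1) m r)
  else (r, m)
termination_by m + 1 - p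
decreasing_by
  · have h1 : p ≤ p * p := by nlinarith
    have := stripN_le m p
    omega
  · have h1 : p ≤ p * p := by nlinarith
    omega

theorem pyStrip_cast (m p : Nat) : pyStrip ↑m ↑p = ↑(stripN m p) := by
  fun_induction stripN m p with
  | case1 a h ih =>
    obtain ⟨hp2, ha, hdvd⟩ := h
    have hmod : a % p = 0 := Nat.mod_eq_zero_of_dvd hdvd
    rw [pyStrip]
    rw [dif_pos ⟨by exact_mod_cast hp2, by exact_mod_cast ha, by
      rw [PySem.Int.mod_natCast]; exact_mod_cast hmod⟩]
    rw [PySem.Int.floordiv_natCast]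
    exact ih
  | case2 a h =>
    rw [pyStrip]
    rw [dif_neg]
    rintro ⟨c1, c2, c3⟩
    rw [PySem.Int.mod_natCast] at c3
    refine h ⟨by exact_mod_cast c1, by exact_mod_cast c2, ?_⟩
    have : a % p = 0 := by exact_mod_cast c3
    exact Nat.dvd_of_mod_eq_zero this

theorem trialLoop_cast (p m r : Nat) :
    trialLoop ↑p ↑m ↑r = (((loopN p m r).1 : Int), ((loopN p m r).2 : Int)) := by
  fun_induction loopN p m r with
  | case1 p m r hle hdvd ih =>
    have hmod : m % p = 0 := by
      exact Nat.mod_eq_zero_of_dvd hdvd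
    rw [trialLoop]
    rw [dif_pos (by exact_mod_cast hle)]
    rw [if_pos (by rw [PySem.Int.mod_natCast]; exact_mod_cast hmod)]
    rw [PySem.Int.floordiv_natCast, pyStrip_cast]
    have hc : ((p : Int) + 1) = ((p + 1 : Nat) : Int) := by push_cast; ring
    have hc2 : ((r : Int) - ↑(r / p)) = ((r - r / p : Nat) : Int) := by
      have := Nat.div_le_self r p; omega
    rw [hc, hc2]
    exact ih
  | case2 p m r hle hdvd ih =>
    rw [trialLoop]
    rw [dif_pos (by exact_mod_cast hle)]
    rw [if_neg (by
      rw [PySem.Int.mod_natCast]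
      intro hc
      have : m % p = 0 := by exact_mod_cast hc
      exact hdvd (Nat.dvd_of_mod_eq_zero this))]
    have hc : ((p : Int) + 1) = ((p + 1 : Nat) : Int) := by push_cast; ring
    rw [hc]
    exact ih
  | case3 p m r hle =>
    rw [trialLoop]
    rw [dif_neg (by exact_mod_cast hle)]

theorem stripN_dvd (m p : Nat) : 0 < m → stripN m p ∣ m ∧ 0 < stripN m p := by
  fun_induction stripN m p with
  | case1 a h ih =>
    intro _
    obtain ⟨hp2, ha, hdvd⟩ := h
    have hpos : 0 < a / p := Nat.div_pos (Nat.le_of_dvd ha hdvd) (by omega)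
    obtain ⟨ih1, ih2⟩ := ih hpos
    refine ⟨ih1.trans ⟨p, (Nat.div_mul_cancel hdvd).symm⟩, ih2⟩
  | case2 a h =>
    intro ha
    exact ⟨dvd_rfl, ha⟩

theorem stripN_not_dvd (m p : Nat) : 0 < m → 2 ≤ p → ¬ p ∣ stripN m p := by
  fun_induction stripN m p with
  | case1 a h ih =>
    intro _ hp2
    obtain ⟨_, ha, hdvd⟩ := h
    exact ih (Nat.div_pos (Nat.le_of_dvd ha hdvd) (by omega)) hp2
  | case2 a h =>
    intro hm hp2 hdvd
    exact h ⟨hp2, hm, hdvd⟩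

theorem stripN_prime_dvd (m p q : Nat) : p.Prime → q.Prime → q ≠ p →
    (q ∣ stripN m p ↔ q ∣ m) := by
  fun_induction stripN m p with
  | case1 a h ih =>
    intro hp hq hqp
    obtain ⟨hp2, ha, hdvd⟩ := h
    rw [ih hp hq hqp]
    constructor
    · intro hqa
      exact hqa.trans ⟨p, (Nat.div_mul_cancel hdvd).symm⟩
    · intro hqa
      rcases hq.dvd_mul.mp (show q ∣ (a / p) * p by rw [Nat.div_mul_cancel hdvd]; exact hqa) with h1 | h1
      · exact h1
      · exact absurd ((Nat.prime_dvd_prime_iff_eq hq hp).mp h1) hqp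
  | case2 a h =>
    intro _ _ _
    exact Iff.rfl

theorem loopN_phi (n : Nat) (hn : 0 < n) (p m r : Nat) :
    2 ≤ p → m ∣ n → 0 < m →
    (∀ q, q.Prime → q ∣ m → p ≤ q) →
    (∀ q, q.Prime → q ∣ n → p ≤ q → q ∣ m) →
    r = (pl p n).foldl stepN n →
    (if 1 < (loopN p m r).2 then (loopN p m r).1 - (loopN p m r).1 / (loopN p m r).2
     else (loopN p m r).1) = phiN n := by
  fun_induction loopN p m r with
  | case1 p m r hle hdvd ih =>
    intro hp2 hmn hm hlow hhigh hr
    have hpp : p.Prime := by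
      have h1 : p.minFac.Prime := Nat.minFac_prime (by omega)
      have h2 : p.minFac ∣ m := (Nat.minFac_dvd p).trans hdvd
      have h3 : p ≤ p.minFac := hlow _ h1 h2
      have h4 : p.minFac ≤ p := Nat.minFac_le (by omega)
      rw [Nat.prime_def_minFac]; exact ⟨hp2, by omega⟩
    have hpn : p ∣ n := hdvd.trans hmn
    have hsp := stripN_dvd m p hm
    apply ih
    · omega
    · exact hsp.1.trans hmn
    · exact hsp.2
    · intro q hq hqd
      have hq1 : q ∣ m := hqd.trans hsp.1
      have hq2 := hlow q hq hq1
      have hne : q ≠ p := by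
        rintro rfl
        exact stripN_not_dvd m q hm hp2 hqd
      omega
    · intro q hq hqn hqp1
      have hq1 : q ∣ m := hhigh q hq hqn (by omega)
      exact (stripN_prime_dvd m p q hpp hq (by omega)).mpr hq1
    · rw [pl_succ, if_pos ⟨hpp, hpn⟩, List.foldl_append]
      simp only [List.foldl_cons, List.foldl_nil]
      rw [← hr]
      rfl
  | case2 p m r hle hndvd ih =>
    intro hp2 hmn hm hlow hhigh hr
    apply ih
    · omega
    · exact hmn
    · exact hm
    · intro q hq hqd
      have h1 := hlow q hq hqd
      have hne : q ≠ p := by rintro rfl; exact hndvd hqd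
      omega
    · intro q hq hqn hq1
      exact hhigh q hq hqn (by omega)
    · rw [pl_succ, if_neg, List.append_nil]
      · exact hr
      · rintro ⟨hp', hpn⟩
        exact hndvd (hhigh p hp' hpn le_rfl)
  | case3 p m r hle =>
    intro hp2 hmn hm hlow hhigh hr
    rcases Nat.lt_or_ge 1 m with hm2 | hm1
    · have hmp : m.Prime := by
        by_contra hc
        have h1 : m.minFac.Prime := Nat.minFac_prime (by omega)
        have h2 : m.minFac ∣ m := Nat.minFac_dvd m
        have h3 : p ≤ m.minFac := hlow _ h1 h2
        have h4 : m.minFac ≤ m := Nat.le_of_dvd (by omega) h2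
        have h5 : m.minFac ≠ m := by
          intro h; exact hc (Nat.prime_def_minFac.mpr ⟨by omega, h⟩)
        have ht : m / m.minFac ∣ m := ⟨m.minFac, (Nat.div_mul_cancel h2).symm⟩
        have htpos : 0 < m / m.minFac := Nat.div_pos h4 h1.pos
        have ht1 : m / m.minFac ≠ 1 := by
          intro h
          have h6 := Nat.div_mul_cancel h2
          rw [h, one_mul] at h6
          exact h5 h6
        have h6 : (m / m.minFac).minFac.Prime := Nat.minFac_prime ht1
        have h7 : (m / m.minFac).minFac ∣ m := (Nat.minFac_dvd _).trans ht
        have h8 : p ≤ (m / m.minFac).minFac := hlow _ h6 h7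
        have h9 : (m / m.minFac).minFac ≤ m / m.minFac := Nat.minFac_le htpos
        have h10 : m.minFac * (m / m.minFac) = m := Nat.mul_div_cancel' h2
        nlinarith
      have hpm : p ≤ m := hlow m hmp dvd_rfl
      have e1 : pl (m+1) n = pl p n ++ [m] := by
        rw [pl_succ, if_pos ⟨hmp, hmn⟩]
        congr 1
        refine pl_ext p m n hpm ?_
        rintro q hq hq2 ⟨hqp, hqn⟩
        have hq3 : q ∣ m := hhigh q hqp hqn hq
        have := (Nat.prime_dvd_prime_iff_eq hqp hmp).mp hq3
        omega
      have e2 : pl (n+1) n = pl (m+1) n := by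
        refine pl_ext (m+1) (n+1) n (by have := Nat.le_of_dvd hn hmn; omega) ?_
        rintro q hq hq2 ⟨hqp, hqn⟩
        have hq3 : q ∣ m := hhigh q hqp hqn (by omega)
        have := (Nat.prime_dvd_prime_iff_eq hqp hmp).mp hq3
        omega
      unfold phiN
      rw [e2, e1, List.foldl_append]
      simp only [List.foldl_cons, List.foldl_nil]
      rw [← hr, if_pos hm2]
      rfl
    · have hm1' : m = 1 := by omega
      subst hm1'
      have hall : ∀ q, q.Prime → q ∣ n → q < p := by
        intro q hq hqn
        by_contra hc
        have h1 : q ∣ 1 := hhigh q hq hqn (by omega)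
        have := Nat.dvd_one.mp h1
        have := hq.two_le
        omega
      have e : pl p n = pl (n+1) n :=
        pl_stable p (n+1) n hall (fun q hq hqn => by
          have := Nat.le_of_dvd hn hqn; omega)
      rw [if_neg (by omega), hr, e]
      rfl

theorem phiPort_correct (n : Nat) (hn : 1 ≤ n) : phiPort ↑n = ↑(phiN n) := by
  have e : phiPort ↑n =
      (if 1 < (trialLoop 2 (↑n) (↑n)).2 then
        (trialLoop 2 (↑n) (↑n)).1 -
          PySem.Int.floordiv (trialLoop 2 (↑n) (↑n)).1 (trialLoop 2 (↑n) (↑n)).2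
       else (trialLoop 2 (↑n) (↑n)).1) := rfl
  rw [e, show (2:Int) = ((2:Nat):Int) from rfl, trialLoop_cast 2 n n]
  have key := loopN_phi n (by omega) 2 n n le_rfl dvd_rfl (by omega)
      (fun q hq _ => hq.two_le) (fun q hq hqn _ => hqn)
      (by rw [pl_two]; rfl)
  by_cases h2 : 1 < (loopN 2 n n).2
  · simp only [if_pos h2, if_pos (show (1:Int) < ↑(loopN 2 n n).2 by exact_mod_cast h2)] at key ⊢
    rw [PySem.Int.floordiv_natCast]
    have hd := Nat.div_le_self (loopN 2 n n).1 (loopN 2 n n).2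
    omega
  · simp only [if_neg h2, if_neg (show ¬ (1:Int) < ↑(loopN 2 n n).2 by exact_mod_cast h2)] at key ⊢
    exact_mod_cast key

-- ---- B side: the summation pass ----
theorem alt_sum (M : Nat) :
    (PySem.List.pyRange 1 ((M:Int) + 1) 1).foldl
      (fun (acc : Int × Int) n =>
        let f := phiPort n
        (acc.1 + f, if PySem.Int.mod n 2 = 1 then acc.2 + f else acc.2)) (0, 0)
      = (SAll M, SOdd M) := by
  induction M with
  | zero =>
    rw [PySem.List.pyRange_one_eq_nil (by omega)]
    rfl
  | succ M ih =>
    have hb : ((M + 1 : Nat) : Int) + 1 = ((M:Int) + 1) + 1 := by push_cast; ring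
    rw [hb, PySem.List.pyRange_one_succ_right (by omega), List.foldl_append, ih]
    simp only [List.foldl_cons, List.foldl_nil]
    have hcast : (M:Int) + 1 = ((M + 1 : Nat) : Int) := by push_cast; ring
    rw [hcast, phiPort_correct (M+1) (by omega)]
    rw [show (2:Int) = ((2:Nat):Int) from rfl, PySem.Int.mod_natCast]
    have hSAll : SAll (M+1) = SAll M + ↑(phiN (M+1)) := by
      unfold SAll
      rw [List.range'_concat, List.map_append, List.foldl_append]
      simp only [List.map_cons, List.map_nil, List.foldl_cons, List.foldl_nil]
      have h11 : 1 + 1*M = M + 1 := by omega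
      rw [h11]
    by_cases hpar : (M + 1) % 2 = 1
    · rw [if_pos (by exact_mod_cast hpar)]
      have hSOdd : SOdd (M+1) = SOdd M + ↑(phiN (M+1)) := by
        unfold SOdd
        have hlen : (M + 1 + 1) / 2 = (M+1)/2 + 1 := by omega
        rw [hlen, List.range_succ, List.map_append, List.foldl_append]
        simp only [List.map_cons, List.map_nil, List.foldl_cons, List.foldl_nil]
        have : 1 + 2 * ((M+1)/2) = M + 1 := by omega
        rw [this]
      rw [hSAll, hSOdd]
    · rw [if_neg (by
        intro hc
        exact hpar (by exact_mod_cast hc))]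
      have hSOdd : SOdd (M+1) = SOdd M := by
        unfold SOdd
        have hlen : (M + 1 + 1) / 2 = (M+1)/2 := by omega
        rw [hlen]
      rw [hSAll, hSOdd]

-- ---- A side: the sieve ----
def innerF (i : Int) : List Int → Int → List Int := fun ψ j =>
  PySem.List.pySetD ψ j
    (PySem.List.pyGetD ψ j 0 - PySem.Int.floordiv (PySem.List.pyGetD ψ j 0) i)

def bodyF (N : Int) : List Int → Int → List Int := fun φ i =>
  if PySem.List.pyGetD φ i 0 = i then
    (PySem.List.pyRange i (N + 1) i).foldl (innerF i) φ
  else φ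

theorem innerF_foldl_len (i : Int) : ∀ (l : List Int) (φ : List Int),
    (l.foldl (innerF i) φ).length = φ.length := by
  intro l
  induction l with
  | nil => intro φ; rfl
  | cons x t ih =>
    intro φ
    simp only [List.foldl_cons]
    rw [ih]
    exact PySem.List.length_pySetD _ _ _

theorem innerF_foldl_get (i : Int) : ∀ (l : List Int) (φ : List Int), l.Nodup →
    (∀ x ∈ l, 0 ≤ x ∧ x < ↑φ.length) → ∀ (m : Nat), m < φ.length →
    PySem.List.pyGetD (l.foldl (innerF i) φ) ↑m 0 =
      if (↑m : Int) ∈ l then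
        PySem.List.pyGetD φ ↑m 0 - PySem.Int.floordiv (PySem.List.pyGetD φ ↑m 0) i
      else PySem.List.pyGetD φ ↑m 0 := by
  intro l
  induction l with
  | nil => intro φ _ _ m hm; simp
  | cons x t ih =>
    intro φ hnd hb m hm
    obtain ⟨hx0, hxlen⟩ := hb x List.mem_cons_self
    have hxe : x = ((x.toNat : Nat) : Int) := by omega
    simp only [List.foldl_cons]
    have hlen' : (innerF i φ x).length = φ.length := PySem.List.length_pySetD _ _ _
    have hget' : ∀ m' : Nat, m' < φ.length →
        PySem.List.pyGetD (innerF i φ x) ↑m' 0 =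
          if m' = x.toNat then
            PySem.List.pyGetD φ ↑m' 0 - PySem.Int.floordiv (PySem.List.pyGetD φ ↑m' 0) i
          else PySem.List.pyGetD φ ↑m' 0 := by
      intro m' hm'
      show PySem.List.pyGetD (PySem.List.pySetD φ x _) ↑m' 0 = _
      rw [hxe, PySem.List.pyGetD_pySetD_natCast _ _ _ _ _ (by omega)]
      simp only [Int.toNat_natCast]
      by_cases he : m' = x.toNat
      · rw [if_pos he, if_pos he, he]
      · rw [if_neg he, if_neg he]
    rw [ih (innerF i φ x) (List.Nodup.of_cons hnd)
        (by intro y hy; rw [hlen']; exact hb y (List.mem_cons_of_mem _ hy))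
        m (by omega)]
    have hxt : x ∉ t := (List.nodup_cons.mp hnd).1
    by_cases hmem : (↑m : Int) ∈ t
    · have hne : (↑m : Int) ≠ x := by rintro rfl; exact hxt hmem
      rw [if_pos hmem, if_pos (List.mem_cons_of_mem _ hmem), hget' m hm,
        if_neg (by omega)]
    · rw [if_neg hmem, hget' m hm]
      by_cases he : m = x.toNat
      · rw [if_pos he, if_pos (by rw [List.mem_cons]; left; omega)]
      · rw [if_neg he, if_neg (by
          rw [List.mem_cons]
          rintro (h | h)
          · exact he (by omega)
          · exact hmem h)]

theorem nodup_pyRange_pos (a b s : Int) (hs : 0 < s) :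
    (PySem.List.pyRange a b s).Nodup := by
  rw [PySem.List.pyRange_of_pos a b hs]
  refine List.Nodup.map ?_ List.nodup_range
  intro k k' h
  have h2 : s * (k:Int) = s * k' := by linarith
  have h3 : (k:Int) = k' := mul_left_cancel₀ (by omega) h2
  exact_mod_cast h3

theorem mem_pyRange_mult {i b x : Int} (hi : 0 < i) :
    x ∈ PySem.List.pyRange i b i ↔ i ≤ x ∧ x < b ∧ i ∣ x := by
  rw [PySem.List.mem_pyRange_iff_of_pos hi]
  constructor
  · rintro ⟨h1, h2, h3⟩
    refine ⟨h1, h2, ?_⟩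
    have := dvd_add h3 (dvd_refl i)
    simpa using this
  · rintro ⟨h1, h2, h3⟩
    exact ⟨h1, h2, dvd_sub h3 (dvd_refl i)⟩

theorem sieve_inv (M : Nat) (hM : 1 ≤ M) : ∀ k : Nat, 1 ≤ k → k ≤ M →
    ((((PySem.List.pyRange 2 ((k:Int)+1) 1).foldl (bodyF ↑M)
        (PySem.List.pyRange 0 ((M:Int)+1) 1)).length = M + 1) ∧
     ∀ j : Nat, j ≤ M →
       PySem.List.pyGetD ((PySem.List.pyRange 2 ((k:Int)+1) 1).foldl (bodyF ↑M)
          (PySem.List.pyRange 0 ((M:Int)+1) 1)) ↑j 0 = ↑((pl (k+1) j).foldl stepN j)) := by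
  intro k hk
  induction k, hk using Nat.le_induction with
  | base =>
    intro _
    rw [show ((1:Nat):Int) + 1 = 2 by norm_num,
      PySem.List.pyRange_one_eq_nil (show (2:Int) ≤ 2 by norm_num)]
    simp only [List.foldl_nil]
    constructor
    · rw [PySem.List.length_pyRange_one]; omega
    · intro j hj
      have hjl : j < (PySem.List.pyRange 0 ((M:Int)+1) 1).length := by
        rw [PySem.List.length_pyRange_one]; omega
      rw [PySem.List.pyGetD_natCast, List.getD_eq_getElem _ _ hjl,
        PySem.List.getElem_pyRange_one]
      rw [pl_two]
      simp
  | succ k hk ih =>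
    intro hk1M
    obtain ⟨ihlen, ihval⟩ := ih (by omega)
    have hsplit : PySem.List.pyRange 2 (((k+1:Nat):Int)+1) 1 =
        PySem.List.pyRange 2 ((k:Int)+1) 1 ++ [(k:Int)+1] := by
      rw [show (((k+1:Nat):Int)+1) = (((k:Int)+1)+1) by push_cast; ring,
        PySem.List.pyRange_one_succ_right (by omega)]
    rw [hsplit, List.foldl_append]
    simp only [List.foldl_cons, List.foldl_nil]
    set φk := (PySem.List.pyRange 2 ((k:Int)+1) 1).foldl (bodyF ↑M)
        (PySem.List.pyRange 0 ((M:Int)+1) 1) with hφk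
    have hdet : PySem.List.pyGetD φk ((k:Int)+1) 0 =
        ↑((pl (k+1) (k+1)).foldl stepN (k+1)) := by
      have h1 := ihval (k+1) (by omega)
      rw [show (((k+1:Nat)):Int) = ((k:Int)+1) by push_cast; ring] at h1
      exact h1
    show (bodyF ↑M φk ((k:Int)+1)).length = M + 1 ∧ _
    unfold bodyF
    by_cases hpr : (k+1).Prime
    · rw [if_pos (by
        rw [hdet, (fold_pl_detect (k+1) (by omega)).mpr hpr]
        push_cast; ring)]
      have hnd : (PySem.List.pyRange ((k:Int)+1) ((M:Int)+1) ((k:Int)+1)).Nodup :=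
        nodup_pyRange_pos _ _ _ (by omega)
      have hbnd : ∀ x ∈ PySem.List.pyRange ((k:Int)+1) ((M:Int)+1) ((k:Int)+1),
          0 ≤ x ∧ x < ↑φk.length := by
        intro x hx
        obtain ⟨h1, h2, _⟩ := (mem_pyRange_mult (by omega)).mp hx
        rw [ihlen]
        constructor
        · omega
        · push_cast; omega
      constructor
      · rw [innerF_foldl_len, ihlen]
      · intro j hj
        rw [innerF_foldl_get ((k:Int)+1) _ φk hnd hbnd j (by rw [ihlen]; omega)]
        rw [ihval j hj]
        by_cases hin : (↑j : Int) ∈ PySem.List.pyRange ((k:Int)+1) ((M:Int)+1) ((k:Int)+1)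
        · obtain ⟨h1, h2, h3⟩ := (mem_pyRange_mult (by omega)).mp hin
          have hdj : (k+1) ∣ j := by
            have : ((k+1:Nat):Int) ∣ (j:Nat) := by push_cast; exact h3
            exact_mod_cast this
          have hjge : k+1 ≤ j := by omega
          rw [if_pos hin]
          rw [pl_succ (k+1) j, if_pos ⟨hpr, hdj⟩, List.foldl_append]
          simp only [List.foldl_cons, List.foldl_nil]
          rw [show ((k:Int)+1) = (((k+1:Nat)):Int) by push_cast; ring,
            PySem.Int.floordiv_natCast]
          set F := (pl (k+1) j).foldl stepN j with hF
          have hstep : stepN F (k+1) = F - F/(k+1) := rfl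
          have hdle : F/(k+1) ≤ F := Nat.div_le_self _ _
          omega
        · rw [if_neg hin]
          by_cases hdj : (k+1) ∣ j
          · rcases Nat.lt_or_ge j (k+1) with hlt | hge
            · have hj0 : j = 0 := Nat.eq_zero_of_dvd_of_lt hdj hlt
              subst hj0
              rw [foldl_stepN_zero, foldl_stepN_zero]
            · exfalso
              apply hin
              rw [mem_pyRange_mult (by omega)]
              refine ⟨by omega, by push_cast; omega, ?_⟩
              have h5 : ((k+1:Nat):Int) ∣ ((j:Nat):Int) := by exact_mod_cast hdj
              have h6 : ((k+1:Nat):Int) = (k:Int)+1 := by push_cast; ring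
              rw [h6] at h5
              exact h5
          · rw [pl_succ (k+1) j, if_neg (by rintro ⟨_, hd⟩; exact hdj hd), List.append_nil]
    · rw [if_neg (by
        rw [hdet]
        intro hc
        have hc2 : ((pl (k+1) (k+1)).foldl stepN (k+1)) = k+1 := by
          have : ((k:Int)+1) = (((k+1:Nat)):Int) := by push_cast; ring
          rw [this] at hc
          exact_mod_cast hc
        exact hpr ((fold_pl_detect (k+1) (by omega)).mp hc2))]
      refine ⟨ihlen, ?_⟩
      intro j hj
      rw [ihval j hj]
      rw [pl_succ (k+1) j, if_neg (by rintro ⟨h1, _⟩; exact hpr h1), List.append_nil]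

theorem A_value (M : Nat) (hM : 1 ≤ M) :
    fractured_ledger ↑M = 2 * SAll M - 1 + SOdd M := by
  obtain ⟨hlen, hval⟩ := sieve_inv M hM M hM le_rfl
  have e : fractured_ledger ↑M =
      2 * ((PySem.List.slice ((PySem.List.pyRange 2 ((M:Int)+1) 1).foldl (bodyF ↑M)
              (PySem.List.pyRange 0 ((M:Int)+1) 1)) (some 1) none).foldl (· + ·) 0)
        - 1 +
        ((PySem.List.pyRange 1 ((M:Int)+1) 2).foldl
          (fun acc i => acc + PySem.List.pyGetD
            ((PySem.List.pyRange 2 ((M:Int)+1) 1).foldl (bodyF ↑M)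
              (PySem.List.pyRange 0 ((M:Int)+1) 1)) i 0) 0) := rfl
  rw [e]
  set φ := (PySem.List.pyRange 2 ((M:Int)+1) 1).foldl (bodyF ↑M)
      (PySem.List.pyRange 0 ((M:Int)+1) 1) with hφ
  have hmap : φ = (List.range (M+1)).map
      (fun j => (((pl (M+1) j).foldl stepN j : Nat) : Int)) := by
    apply List.ext_getElem
    · rw [hlen, List.length_map, List.length_range]
    · intro j h1 h2
      have hj : j ≤ M := by rw [hlen] at h1; omega
      have hv := hval j hj
      rw [PySem.List.pyGetD_natCast, List.getD_eq_getElem _ _ h1] at hv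
      rw [hv]
      rw [List.getElem_map, List.getElem_range]
  have htot : (PySem.List.slice φ (some 1) none).foldl (· + ·) 0 = SAll M := by
    rw [show (some (1:Int)) = some (((1:Nat):Int)) from rfl,
      PySem.List.slice_from_natCast, hmap, ← List.map_drop]
    have hdr : List.drop 1 (List.range (M+1)) = List.range' 1 M := by
      rw [List.range_eq_range', List.range'_succ]
      simp
    rw [hdr]
    unfold SAll
    congr 1
    refine List.map_congr_left (fun j hj => ?_)
    rw [List.mem_range'_1] at hj
    rw [pl_eq_phi_list j M (by omega) (by omega)]
    rfl
  have hodd : (PySem.List.pyRange 1 ((M:Int)+1) 2).foldl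
      (fun acc i => acc + PySem.List.pyGetD φ i 0) 0 = SOdd M := by
    rw [PySem.List.pyRange_of_pos 1 ((M:Int)+1) (by omega)]
    have hcnt : (if (1:Int) < (M:Int)+1 then ((((M:Int)+1) - 1 + 2 - 1)/2).toNat else 0)
        = (M+1)/2 := by
      rw [if_pos (by omega)]
      omega
    rw [hcnt, List.foldl_map]
    rw [PySem.List.foldl_congr_mem _ _ (fun (acc : Int) (k : Nat) => acc + ↑(phiN (1+2*k))) 0
      (by
        intro acc k hk
        rw [List.mem_range] at hk
        have hle : 1 + 2*k ≤ M := by omega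
        have hcast : (1:Int) + 2 * (k:Int) = ((1+2*k : Nat) : Int) := by push_cast; ring
        rw [hcast, hval (1+2*k) hle, pl_eq_phi_list (1+2*k) M (by omega) hle]
        rfl)]
    unfold SOdd
    rw [List.foldl_map]
  rw [htot, hodd]

theorem B_value (M : Nat) :
    fractured_ledger_alt ↑M = 2 * SAll M - 1 + SOdd M := by
  have e : fractured_ledger_alt ↑M =
      2 * ((PySem.List.pyRange 1 ((M:Int)+1) 1).foldl
        (fun (acc : Int × Int) n =>
          let f := phiPort n
          (acc.1 + f, if PySem.Int.mod n 2 = 1 then acc.2 + f else acc.2)) (0, 0)).1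
        - 1 +
        ((PySem.List.pyRange 1 ((M:Int)+1) 1).foldl
        (fun (acc : Int × Int) n =>
          let f := phiPort n
          (acc.1 + f, if PySem.Int.mod n 2 = 1 then acc.2 + f else acc.2)) (0, 0)).2 := rfl
  rw [e, alt_sum M]

theorem A_neg (N : Int) (hN : N ≤ 0) : fractured_ledger N = -1 := by
  unfold fractured_ledger
  rw [PySem.List.pyRange_one_eq_nil (show N+1 ≤ 2 by omega)]
  simp only [List.foldl_nil]
  rw [show (some (1:Int)) = some (((1:Nat):Int)) from rfl, PySem.List.slice_from_natCast]
  rw [List.drop_eq_nil_of_le (by rw [PySem.List.length_pyRange_one]; omega)]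
  rw [PySem.List.pyRange_of_pos 1 (N+1) (by omega : (0:Int) < 2), if_neg (by omega)]
  simp

theorem B_neg (N : Int) (hN : N ≤ 0) : fractured_ledger_alt N = -1 := by
  unfold fractured_ledger_alt
  rw [PySem.List.pyRange_one_eq_nil (show N+1 ≤ 1 by omega)]
  simp

-- ===== VERDICT (by name: the statement is the Claim_ definition above) =====
theorem fractured_ledger_spec : Claim_equal_fractured_ledger := by
  intro N _
  unfold Spec_fractured_ledger
  rcases le_or_gt N 0 with h | h
  · rw [A_neg N h, B_neg N h]
  · have hM : N = ((N.toNat : Nat) : Int) := by omega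
    have h1 : 1 ≤ N.toNat := by omega
    rw [hM, A_value N.toNat h1, B_value N.toNat]
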